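-- pv_equiv track=rewrite | github.com/pymc-devs/pytensor | pytensor/tensor/rewriting/math.py | simplify_factors
-- ===== SOURCE A (Python) =====
-- def simplify_factors(num, denum):
--     """
--     For any Variable r which is both in num and denum, removes it
--     from both lists. Modifies the lists inplace. Returns the
--     modified lists. For example:
--
--     | [x], [x] -> [], []
--     | [x, y], [x] -> [y], []
--     | [a, b], [c, d] -> [a, b], [c, d]
--
--     """
--     ln = len(num)
--     ld = len(denum)
--     if ld > 2 and ln > 2:
--         # Faster version for "big" inputs.
--         while True:
--             s = set(num)
--             # Inputs can appear multiple times
--             redo = len(s) != len(num)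
--             inter = s.intersection(denum)
--             for v in inter:
--                 num.remove(v)
--                 denum.remove(v)
--             if not (redo and inter):
--                 break
--     else:
--         for v in list(num):
--             if v in denum:
--                 num.remove(v)
--                 denum.remove(v)
--     return num, denum
-- ===== SOURCE B (Python) =====
-- def simplify_factors(num, denum):
--     """
--     For any Variable r which is both in num and denum, removes it
--     from both lists. Modifies the lists inplace. Returns the
--     modified lists.
--     """
--     bd = {}
--     for v in denum:
--         bd[v] = bd.get(v, 0) + 1
--     bn = {}
--     for v in num:
--         bn[v] = bn.get(v, 0) + 1
--     new_num = []
--     for v in num: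
--         if bd.get(v, 0) > 0:
--             bd[v] -= 1
--         else:
--             new_num.append(v)
--     new_denum = []
--     for v in denum:
--         if bn.get(v, 0) > 0:
--             bn[v] -= 1
--         else:
--             new_denum.append(v)
--     num[:] = new_num
--     denum[:] = new_denum
--     return num, denum
-- ===== Notes on version B (the rewrite author's own statement) =====
-- stated objective: faster
-- what changed: Replaces A's size-based branch dispatch (repeated set-intersection passes with list.remove for big inputs, a quadratic scan-and-remove loop for small ones) by one precomputed count table per side and two independent linear filter passes, written back with slice assignment.
import Mathlib
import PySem

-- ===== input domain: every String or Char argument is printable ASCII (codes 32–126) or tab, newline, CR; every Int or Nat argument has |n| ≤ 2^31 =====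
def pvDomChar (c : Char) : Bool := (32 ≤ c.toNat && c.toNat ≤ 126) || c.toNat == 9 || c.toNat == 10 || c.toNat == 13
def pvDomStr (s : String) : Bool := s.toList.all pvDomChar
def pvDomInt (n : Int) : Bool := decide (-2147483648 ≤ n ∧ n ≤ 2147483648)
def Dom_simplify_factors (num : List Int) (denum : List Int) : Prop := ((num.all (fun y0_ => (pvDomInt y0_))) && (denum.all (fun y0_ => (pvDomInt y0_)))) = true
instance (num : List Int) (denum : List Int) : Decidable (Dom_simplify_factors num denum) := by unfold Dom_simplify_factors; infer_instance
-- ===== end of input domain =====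

-- B replaces A's size-based branch dispatch and intersection/remove loops by one count table per
-- side plus two linear filter passes (same return value; A and B both mutate the argument lists in
-- place in Python — the equivalence proved here is about the return value).

-- ===== PORT A =====
-- xs.remove(v): at every call site of A the element is present, so remove? is some there
-- (Python would raise ValueError otherwise — that branch is unreachable; getD is only a totalizer).
def pyRemove (xs : List Int) (v : Int) : List Int := (PySem.List.remove? xs v).getD xs

-- the small branch: 'for v in list(num): if v in denum: num.remove(v); denum.remove(v)'
def smallLoop (vs : List Int) (n : List Int) (d : List Int) : List Int × List Int :=
  match vs with
  | [] => (n, d)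
  | v :: rest =>
      if v ∈ d then smallLoop rest (pyRemove n v) (pyRemove d v)
      else smallLoop rest n d

-- one 'while True' iteration body plus the loop, fuelled: n.length + 1 fuel always suffices
-- (each continuing iteration removes at least one element of n; the 0 case is unreachable).
-- Python iterates 'for v in inter' in set hash order; the removals are of DISTINCT values and
-- commute, so the result does not depend on that order (this is what the proofs below establish);
-- we iterate inter in the Set's first-insertion order.
def bigLoop (fuel : Nat) (n : List Int) (d : List Int) : List Int × List Int :=
  match fuel with
  | 0 => (n, d)
  | fuel + 1 =>
      let s : PySem.Set Int := PySem.Set.ofList n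
      let redo : Bool := decide (s.length ≠ n.length)
      let inter : List Int := PySem.Set.inter s d
      let p := inter.foldl (fun (p : List Int × List Int) v => (pyRemove p.1 v, pyRemove p.2 v)) (n, d)
      if redo ∧ inter ≠ [] then bigLoop fuel p.1 p.2 else p

def simplify_factors (num : List Int) (denum : List Int) : List Int × List Int :=
  let ln := num.length
  let ld := denum.length
  if 2 < ld ∧ 2 < ln then bigLoop (num.length + 1) num denum
  else smallLoop num num denum

-- ===== PORT B =====
-- bd = {}; for v in xs: bd[v] = bd.get(v, 0) + 1
def bCounter (xs : List Int) : PySem.Dict Int Int :=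
  xs.foldl (fun d v => d.insert v (d.getD v 0 + 1)) PySem.Dict.empty

-- out = []; for v in xs: if b.get(v,0) > 0: b[v] -= 1 else: out.append(v)
def bFilter (xs : List Int) (b : PySem.Dict Int Int) (out : List Int) : PySem.Dict Int Int × List Int :=
  match xs with
  | [] => (b, out)
  | v :: rest =>
      if 0 < b.getD v 0 then bFilter rest (b.insert v (b.getD v 0 - 1)) out
      else bFilter rest b (out ++ [v])

def simplify_factors_alt (num : List Int) (denum : List Int) : List Int × List Int :=
  let bd := bCounter denum
  let bn := bCounter num
  let new_num := (bFilter num bd []).2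
  let new_denum := (bFilter denum bn []).2
  (new_num, new_denum)

-- ===== PRECONDITION & SPEC =====
def Spec_simplify_factors (num : List Int) (denum : List Int) (out : List Int × List Int) : Prop := out = simplify_factors_alt num denum
instance (num : List Int) (denum : List Int) (out : List Int × List Int) : Decidable (Spec_simplify_factors num denum out) := by unfold Spec_simplify_factors; infer_instance

-- ===== CLAIM (what is proved, stated in full; the proofs are below) =====
def Claim_equal_simplify_factors : Prop := ∀ (num : List Int) (denum : List Int), Dom_simplify_factors num denum → Spec_simplify_factors num denum (simplify_factors num denum)

-- ===== LEMMAS AND PROOFS =====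

-- Canonical form both ports are reduced to: drop from xs the first (b v) occurrences of each v.
def decb (b : Int → Nat) (v : Int) : Int → Nat := fun w => if w = v then b v - 1 else b w

def dropB (xs : List Int) (b : Int → Nat) : List Int :=
  match xs with
  | [] => []
  | v :: rest => if 0 < b v then dropB rest (decb b v) else v :: dropB rest b

theorem pyRemove_eq_erase (xs : List Int) (v : Int) : pyRemove xs v = xs.erase v := by
  by_cases h : v ∈ xs
  · simp [pyRemove, PySem.List.remove?_eq_some_erase _ _ h]
  · rw [pyRemove, (PySem.List.remove?_eq_none_iff xs v).2 h, List.erase_of_not_mem h]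
    rfl

theorem dropB_congr (xs : List Int) (b b' : Int → Nat) (h : ∀ w ∈ xs, b w = b' w) :
    dropB xs b = dropB xs b' := by
  induction xs generalizing b b' with
  | nil => rfl
  | cons v rest ih =>
      have hv : b v = b' v := h v (List.mem_cons_self)
      by_cases hb : 0 < b v
      · rw [dropB, dropB, if_pos hb, if_pos (hv ▸ hb)]
        exact ih _ _ (fun w hw => by
          simp only [decb, hv]
          split <;> simp [h w (List.mem_cons_of_mem _ hw)])
      · rw [dropB, dropB, if_neg hb, if_neg (hv ▸ hb)]
        exact congrArg _ (ih _ _ (fun w hw => h w (List.mem_cons_of_mem _ hw)))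

theorem dropB_zero (xs : List Int) (b : Int → Nat) (h : ∀ v ∈ xs, b v = 0) :
    dropB xs b = xs := by
  induction xs generalizing b with
  | nil => rfl
  | cons v rest ih =>
      rw [dropB, if_neg (by simp [h v List.mem_cons_self])]
      exact congrArg _ (ih b (fun w hw => h w (List.mem_cons_of_mem _ hw)))

-- erasing one occurrence of v then dropping one fewer copies of v = dropping with budget b
theorem dropB_erase (n : List Int) (b : Int → Nat) (v : Int) (hv : v ∈ n) (hb : 0 < b v) :
    dropB (n.erase v) (decb b v) = dropB n b := by
  induction n generalizing b with
  | nil => cases hv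
  | cons u rest ih =>
      by_cases huv : u = v
      · subst huv
        rw [List.erase_cons_head, dropB, if_pos hb]
      · rw [List.erase_cons_tail (by simp [huv])]
        have hvr : v ∈ rest := by
          cases List.mem_cons.1 hv with
          | inl h => exact absurd h.symm huv
          | inr h => exact h
        have hdu : decb b v u = b u := by simp [decb, huv]
        by_cases hu : 0 < b u
        · rw [dropB, dropB, if_pos (hdu ▸ hu), if_pos hu]
          have : decb (decb b v) u = decb (decb b u) v := by
            funext w; simp only [decb]
            by_cases h1 : w = u
            · simp [h1, huv]
            · by_cases h2 : w = v
              · simp [h2, Ne.symm huv]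
              · simp [h1, h2]
          rw [this]
          exact ih (decb b u) hvr (by simpa [decb, Ne.symm huv] using hb)
        · rw [dropB, dropB, if_neg (hdu ▸ hu), if_neg hu]
          exact congrArg _ (ih b hvr hb)

theorem count_erase_fun (d : List Int) (v : Int) :
    (fun w => (d.erase v).count w) = decb (fun w => d.count w) v := by
  funext w
  by_cases h : w = v
  · subst h; simp [decb, List.count_erase_self]
  · simp [decb, h, List.count_erase_of_ne h]

-- ---- A, small branch ----
theorem smallLoop_key (vs kept d : List Int) (h : ∀ v ∈ kept, v ∉ d) :
    smallLoop vs (kept ++ vs) d =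
      (kept ++ dropB vs (fun v => d.count v), dropB d (fun v => vs.count v)) := by
  induction vs generalizing kept d with
  | nil =>
      simp only [smallLoop, dropB, List.append_nil]
      rw [dropB_zero d _ (by simp)]
  | cons v rest ih =>
      by_cases hv : v ∈ d
      · rw [smallLoop, if_pos hv, pyRemove_eq_erase, pyRemove_eq_erase,
          List.erase_append_right _ (h v · hv), List.erase_cons_head]
        rw [ih kept (d.erase v) (fun w hw => fun hmem => h w hw (List.mem_of_mem_erase hmem))]
        rw [Prod.mk.injEq]
        refine ⟨?_, ?_⟩
        · -- first component
          rw [dropB, if_pos (by simpa using List.count_pos_iff.2 hv), count_erase_fun]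
        · -- second component
          have hcnt : (fun w => rest.count w) = decb (fun w => (v :: rest).count w) v := by
            funext w
            by_cases hwv : w = v
            · subst hwv; simp [decb, List.count_cons_self]
            · simp [decb, hwv, Ne.symm hwv]
          rw [hcnt, dropB_erase d _ v hv (by simp [List.count_cons_self])]
      · rw [smallLoop, if_neg hv]
        have : kept ++ v :: rest = (kept ++ [v]) ++ rest := by simp
        rw [this, ih (kept ++ [v]) d (by
          intro w hw
          rcases List.mem_append.1 hw with h1 | h1
          · exact h w h1
          · simp at h1; subst h1; exact hv)]
        rw [Prod.mk.injEq]
        refine ⟨?_, ?_⟩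
        · rw [dropB, if_neg (by simp [List.count_eq_zero_of_not_mem hv])]
          simp only [List.append_assoc, List.singleton_append]
        · exact dropB_congr d _ _ (fun w hw => by
            by_cases hwv : w = v
            · subst hwv; exact absurd hw hv
            · simp [Ne.symm hwv])

-- ---- A, big branch ----
theorem foldl_pair_erase (l : List Int) (n d : List Int) :
    l.foldl (fun (p : List Int × List Int) v => (pyRemove p.1 v, pyRemove p.2 v)) (n, d) =
      (l.foldl List.erase n, l.foldl List.erase d) := by
  have hfun : (fun (p : List Int × List Int) v => (pyRemove p.1 v, pyRemove p.2 v)) =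
      (fun (p : List Int × List Int) v => (p.1.erase v, p.2.erase v)) := by
    funext p v; rw [pyRemove_eq_erase, pyRemove_eq_erase]
  rw [hfun]
  induction l generalizing n d with
  | nil => rfl
  | cons v rest ih => simp only [List.foldl_cons]; exact ih _ _

theorem length_foldl_erase_le (l : List Int) (n : List Int) :
    (l.foldl List.erase n).length ≤ n.length := by
  induction l generalizing n with
  | nil => simp
  | cons v rest ih => exact le_trans (ih _) List.length_erase_le

theorem count_foldl_erase (l : List Int) (n : List Int) (hnd : l.Nodup) (w : Int) :
    (l.foldl List.erase n).count w = n.count w - (if w ∈ l then 1 else 0) := by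
  induction l generalizing n with
  | nil => simp
  | cons v rest ih =>
      rw [List.foldl_cons, ih _ (List.nodup_cons.1 hnd).2]
      by_cases hwv : w = v
      · subst hwv
        simp [List.count_erase_self, (List.nodup_cons.1 hnd).1]
      · simp [List.count_erase_of_ne hwv, hwv]

theorem foldl_erase_inv (l : List Int) (n d : List Int) (hnd : l.Nodup)
    (h : ∀ v ∈ l, v ∈ n ∧ v ∈ d) :
    dropB (l.foldl List.erase n) (fun w => (l.foldl List.erase d).count w) =
      dropB n (fun w => d.count w) ∧
    dropB (l.foldl List.erase d) (fun w => (l.foldl List.erase n).count w) =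
      dropB d (fun w => n.count w) := by
  induction l generalizing n d with
  | nil => exact ⟨rfl, rfl⟩
  | cons v rest ih =>
      obtain ⟨hvn, hvd⟩ := h v List.mem_cons_self
      have hstep : ∀ u ∈ rest, u ∈ n.erase v ∧ u ∈ d.erase v := by
        intro u hu
        have hne : u ≠ v := by
          intro h'; subst h'; exact (List.nodup_cons.1 hnd).1 hu
        obtain ⟨h1, h2⟩ := h u (List.mem_cons_of_mem _ hu)
        exact ⟨(List.mem_erase_of_ne hne).2 h1, (List.mem_erase_of_ne hne).2 h2⟩
      obtain ⟨ih1, ih2⟩ := ih (n.erase v) (d.erase v) (List.nodup_cons.1 hnd).2 hstep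
      rw [List.foldl_cons, List.foldl_cons]
      refine ⟨ih1.trans ?_, ih2.trans ?_⟩
      · rw [count_erase_fun, dropB_erase n _ v hvn (by simpa using List.count_pos_iff.2 hvd)]
      · rw [count_erase_fun, dropB_erase d _ v hvd (by simpa using List.count_pos_iff.2 hvn)]

theorem bigLoop_eq (fuel : Nat) (n d : List Int) (hf : n.length < fuel) :
    bigLoop fuel n d = (dropB n (fun w => d.count w), dropB d (fun w => n.count w)) := by
  induction fuel generalizing n d with
  | zero => omega
  | succ fuel ih =>
      rw [bigLoop]
      set s : PySem.Set Int := PySem.Set.ofList n with hs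
      set inter : List Int := PySem.Set.inter s d with hinter
      have hmem_s : ∀ v, v ∈ s ↔ v ∈ n := fun v => by rw [hs]; exact PySem.Set.mem_ofList n v
      have hinter_mem : ∀ v ∈ inter, v ∈ n ∧ v ∈ d := by
        intro v hv
        rw [hinter, PySem.Set.inter] at hv
        simp only [List.mem_filter] at hv
        exact ⟨(hmem_s v).1 hv.1, by simpa using hv.2⟩
      have hinter_nodup : inter.Nodup := by
        rw [hinter, PySem.Set.inter]
        rw [hs]
        exact List.Nodup.filter _ (PySem.Set.nodup_ofList n)
      rw [foldl_pair_erase]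
      obtain ⟨hi1, hi2⟩ := foldl_erase_inv inter n d hinter_nodup hinter_mem
      by_cases hcond : (decide (s.length ≠ n.length) : Bool) = true ∧ inter ≠ []
      · rw [if_pos hcond]
        have hlen : (inter.foldl List.erase n).length < n.length := by
          obtain ⟨v, rest, hvr⟩ := List.exists_cons_of_ne_nil hcond.2
          rw [hvr, List.foldl_cons]
          calc (rest.foldl List.erase (n.erase v)).length
              ≤ (n.erase v).length := length_foldl_erase_le _ _
            _ < n.length := by
                rw [List.length_erase_of_mem (hinter_mem v (hvr ▸ List.mem_cons_self)).1]
                have := List.length_pos_of_mem (hinter_mem v (hvr ▸ List.mem_cons_self)).1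
                omega
        have hrec := ih (inter.foldl List.erase n) (inter.foldl List.erase d) (by omega)
        rw [hrec, hi1, hi2]
      · rw [if_neg hcond]
        -- exit: show the state is already fully cancelled
        have hdone : ∀ v, v ∈ inter.foldl List.erase n → v ∈ inter.foldl List.erase d → False := by
          intro v h1 h2
          have hvn : v ∈ n := by
            have := count_foldl_erase inter n hinter_nodup v
            have h1c := List.count_pos_iff.2 h1
            rw [this] at h1c
            exact List.count_pos_iff.1 (by omega)
          have hvd : v ∈ d := by
            have := count_foldl_erase inter d hinter_nodup v
            have h2c := List.count_pos_iff.2 h2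
            rw [this] at h2c
            exact List.count_pos_iff.1 (by omega)
          have hvi : v ∈ inter := by
            rw [hinter, PySem.Set.inter]
            exact List.mem_filter.2 ⟨(hmem_s v).2 hvn, by simpa using hvd⟩
          rcases not_and_or.1 hcond with hredo | hne
          · -- n has no duplicates: count v n = 1, so v was fully erased from n
            have hnodup : n.Nodup := by
              simp only [ne_eq, decide_not, Bool.not_eq_true', decide_eq_false_iff_not,
                Decidable.not_not] at hredo
              have hlen : (PySem.Set.ofList n).length = n.length := by rw [← hs]; exact hredo
              have hsub : List.Subperm (PySem.Set.ofList n) n :=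
                List.Nodup.subperm (PySem.Set.nodup_ofList n)
                  (fun x hx => (PySem.Set.mem_ofList n x).1 hx)
              have hperm := hsub.perm_of_length_le (by omega)
              exact (hperm.nodup_iff).1 (PySem.Set.nodup_ofList n)
            have hc1 : n.count v = 1 := List.count_eq_one_of_mem hnodup hvn
            have := count_foldl_erase inter n hinter_nodup v
            rw [hc1, if_pos hvi] at this
            exact absurd h1 (by rw [← List.count_pos_iff, this]; omega)
          · rw [Decidable.not_not.1 hne] at hvi
            cases hvi
        rw [hi1.symm, hi2.symm] at *
        refine Prod.ext ?_ ?_ <;> simp only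
        · rw [← hi1, dropB_zero]
          intro v hv
          by_cases h2 : v ∈ inter.foldl List.erase d
          · exact absurd h2 (fun h2 => hdone v hv h2)
          · exact List.count_eq_zero_of_not_mem h2
        · rw [← hi2, dropB_zero]
          intro v hv
          by_cases h2 : v ∈ inter.foldl List.erase n
          · exact absurd h2 (fun h2 => hdone v h2 hv)
          · exact List.count_eq_zero_of_not_mem h2

-- ---- B ----
theorem bFilter_eq (xs : List Int) (bd : PySem.Dict Int Int) (c : Int → Nat) (out : List Int)
    (h : ∀ v, bd.getD v 0 = (c v : Int)) :
    (bFilter xs bd out).2 = out ++ dropB xs c := by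
  induction xs generalizing bd c out with
  | nil => simp [bFilter, dropB]
  | cons v rest ih =>
      by_cases hv : 0 < c v
      · rw [bFilter, if_pos (by rw [h v]; exact_mod_cast hv), dropB, if_pos hv]
        exact ih _ (decb c v) out (fun w => by
          rw [PySem.Dict.getD_insert]
          by_cases hwv : w = v
          · rw [if_pos hwv, hwv, h v]
            simp only [decb]
            simp
            omega
          · rw [if_neg hwv, h w]
            simp [decb, hwv])
      · rw [bFilter, if_neg (by rw [h v]; exact_mod_cast hv), dropB, if_neg hv]
        rw [ih _ c _ h]
        simp

theorem bCounter_getD (xs : List Int) (v : Int) : (bCounter xs).getD v 0 = (xs.count v : Int) := by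
  rw [bCounter, PySem.Dict.foldl_insert_getD_add_one_eq_counter, PySem.Dict.getD_counter]

theorem alt_eq (num denum : List Int) :
    simplify_factors_alt num denum =
      (dropB num (fun w => denum.count w), dropB denum (fun w => num.count w)) := by
  show ((bFilter num (bCounter denum) []).2, (bFilter denum (bCounter num) []).2) = _
  rw [bFilter_eq num _ (fun w => denum.count w) [] (bCounter_getD denum),
      bFilter_eq denum _ (fun w => num.count w) [] (bCounter_getD num)]
  rfl

-- ===== VERDICT (by name: the statement is the Claim_ definition above) =====
theorem simplify_factors_spec : Claim_equal_simplify_factors := by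
  intro num denum _
  show simplify_factors num denum = simplify_factors_alt num denum
  rw [alt_eq]
  show (if 2 < denum.length ∧ 2 < num.length then bigLoop (num.length + 1) num denum
        else smallLoop num num denum) = _
  by_cases h : 2 < denum.length ∧ 2 < num.length
  · rw [if_pos h, bigLoop_eq _ _ _ (Nat.lt_succ_self _)]
  · rw [if_neg h]
    have := smallLoop_key num [] denum (by simp)
    simp only [List.nil_append] at this
    exact this
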